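-- pv_equiv track=rewrite | github.com/FudanSEGraduationPrj/PJ_YuChaoJun | Step1_preprocessing.py | joint_sentence
-- ===== SOURCE A (Python) =====
-- import string
--
-- def joint_sentence(line):
--     s=""
--     for word in line:
--         if word in string.punctuation:
--             s=s[:-1]+word+" "
--         else:
--             s+=word+" "
--     if line[-1] not in string.punctuation:
--         s = s[:-1] + ". "
--     return s
-- ===== SOURCE B (Python) =====
-- import string
--
-- def joint_sentence(line):
--     seps = ['' if nxt in string.punctuation else ' ' for nxt in line[1:]]
--     seps.append(' ' if line[-1] in string.punctuation else '. ')
--     return ''.join(w + sep for w, sep in zip(line, seps))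
-- ===== Notes on version B (the rewrite author's own statement) =====
-- stated objective: idiomatic
-- what changed: A builds the string backward-looking, slicing off the trailing space whenever a punctuation token arrives; B never edits output: it precomputes a lookahead separator list (empty before a punctuation successor, '. ' or ' ' after the last word) and joins word+separator pairs in one pass.
import Mathlib
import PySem

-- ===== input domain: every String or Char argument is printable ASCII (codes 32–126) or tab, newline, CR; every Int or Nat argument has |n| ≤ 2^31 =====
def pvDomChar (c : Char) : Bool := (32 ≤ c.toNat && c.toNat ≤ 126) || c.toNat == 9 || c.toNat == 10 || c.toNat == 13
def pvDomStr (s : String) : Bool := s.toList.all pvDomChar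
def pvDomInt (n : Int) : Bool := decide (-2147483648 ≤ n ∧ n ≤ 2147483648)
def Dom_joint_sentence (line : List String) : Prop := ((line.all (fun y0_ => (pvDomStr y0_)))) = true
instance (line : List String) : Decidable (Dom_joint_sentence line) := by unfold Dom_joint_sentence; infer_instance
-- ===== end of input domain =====

-- B replaces A's backward string surgery (trimming the trailing space before each punctuation token)
-- by lookahead separators: a separator list computed from each word's successor, joined once (idiomatic).

-- string.punctuation, as a character list
def pvPunct : List Char := "!\"#$%&'()*+,-./:;<=>?@[\\]^_`{|}~".toList

-- ===== PORT A =====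
def joint_sentence (line : List String) : String :=
  let s : List Char := line.foldl (fun s word =>
    if PySem.Chars.isIn word.toList pvPunct then
      PySem.List.slice s none (some (-1)) ++ word.toList ++ [' ']
    else
      s ++ word.toList ++ [' ']) []
  let s : List Char :=
    match PySem.List.pyGet? line (-1) with
    | some last =>
        if ¬ PySem.Chars.isIn last.toList pvPunct then
          PySem.List.slice s none (some (-1)) ++ ". ".toList
        else s
    | none => s   -- Python raises IndexError here (line = []); excluded by Pre_
  String.ofList s

-- ===== PORT B =====
def joint_sentence_alt (line : List String) : String :=
  let seps0 : List (List Char) :=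
    (PySem.List.slice line (some 1) none).map
      (fun nxt => if PySem.Chars.isIn nxt.toList pvPunct then [] else [' '])
  let seps : List (List Char) :=
    match PySem.List.pyGet? line (-1) with
    | some last =>
        seps0 ++ [if PySem.Chars.isIn last.toList pvPunct then [' '] else ['.', ' ']]
    | none => seps0   -- Python raises IndexError here (line = []); excluded by Pre_
  String.ofList ((List.zipWith (fun (w : String) s => w.toList ++ s) line seps).flatten)

-- ===== PRECONDITION & SPEC =====
-- A evaluates line[-1]: on line = [] Python raises IndexError, hence excluded.
def Pre_joint_sentence (line : List String) : Prop := line ≠ []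
instance (line : List String) : Decidable (Pre_joint_sentence line) := by unfold Pre_joint_sentence; infer_instance
def pvWitness_joint_sentence : List String := (["hello", ",", "world", "!"])

def Spec_joint_sentence (line : List String) (out : String) : Prop := out = joint_sentence_alt line
instance (line : List String) (out : String) : Decidable (Spec_joint_sentence line out) := by unfold Spec_joint_sentence; infer_instance

-- ===== CLAIM (what is proved, stated in full; the proofs are below) =====
def Claim_equal_joint_sentence : Prop := ∀ (line : List String), Dom_joint_sentence line → Pre_joint_sentence line → Spec_joint_sentence line (joint_sentence line)

-- ===== LEMMAS AND PROOFS =====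

-- separator that B puts BEFORE a word (= the one it computes from the successor)
def pvSep (w : String) : List Char := if PySem.Chars.isIn w.toList pvPunct then [] else [' ']

-- the middle part: each word preceded by its separator
def pvBody (l : List String) : List Char := (l.map (fun w => pvSep w ++ w.toList)).flatten

-- A's fold, from a state ending in a space, appends pvBody and keeps the trailing space
theorem pvFoldA (l : List String) : ∀ (x : List Char),
    l.foldl (fun s word =>
      if PySem.Chars.isIn word.toList pvPunct then
        PySem.List.slice s none (some (-1)) ++ word.toList ++ [' ']
      else s ++ word.toList ++ [' ']) (x ++ [' '])
      = x ++ pvBody l ++ [' '] := by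
  induction l with
  | nil => intro x; simp [pvBody]
  | cons w t ih =>
    intro x
    simp only [List.foldl_cons]
    by_cases hp : PySem.Chars.isIn w.toList pvPunct
    · rw [if_pos hp, PySem.List.slice_to_neg_one, List.dropLast_concat]
      rw [show x ++ w.toList ++ [' '] = (x ++ w.toList) ++ [' '] from by simp, ih]
      simp [pvBody, pvSep, hp]
    · rw [if_neg hp]
      rw [show x ++ [' '] ++ w.toList ++ [' '] = (x ++ [' '] ++ w.toList) ++ [' '] from by simp, ih]
      simp [pvBody, pvSep, hp]

-- B's zip-join, on w :: t, equals w ++ pvBody t ++ fin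
theorem pvZipB (t : List String) : ∀ (w : String) (fin : List Char),
    (List.zipWith (fun (w : String) s => w.toList ++ s) (w :: t)
        (t.map pvSep ++ [fin])).flatten
      = w.toList ++ pvBody t ++ fin := by
  induction t with
  | nil => intro w fin; simp [pvBody]
  | cons a t ih =>
    intro w fin
    simp only [List.map_cons, List.cons_append, List.zipWith_cons_cons, List.flatten_cons]
    rw [ih a fin]
    simp [pvBody]

-- ===== VERDICT (by name: the statement is the Claim_ definition above) =====
theorem joint_sentence_spec : Claim_equal_joint_sentence := by
  intro line _ hpre
  unfold Spec_joint_sentence joint_sentence joint_sentence_alt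
  cases line with
  | nil => exact absurd rfl hpre
  | cons w t =>
    have hA : (w :: t).foldl (fun s word =>
        if PySem.Chars.isIn word.toList pvPunct then
          PySem.List.slice s none (some (-1)) ++ word.toList ++ [' ']
        else s ++ word.toList ++ [' ']) []
        = w.toList ++ pvBody t ++ [' '] := by
      simp only [List.foldl_cons]
      have h0 : (if PySem.Chars.isIn w.toList pvPunct then
          PySem.List.slice ([] : List Char) none (some (-1)) ++ w.toList ++ [' ']
        else ([] : List Char) ++ w.toList ++ [' ']) = w.toList ++ [' '] := by
        by_cases hp : PySem.Chars.isIn w.toList pvPunct <;>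
          simp [hp, PySem.List.slice_to_neg_one]
      rw [h0, show w.toList ++ [' '] = w.toList ++ [' '] from rfl]
      have := pvFoldA t w.toList
      simpa using this
    have hsl : PySem.List.slice (w :: t) (some 1) none = t := by
      simpa using PySem.List.slice_from_one (w :: t)
    cases hget : PySem.List.pyGet? (w :: t) (-1) with
    | none => simp [PySem.List.pyGet?, PySem.List.pyIdx?] at hget
    | some last =>
      simp only [hA, hsl]
      have hmap : t.map (fun nxt => if PySem.Chars.isIn nxt.toList pvPunct then ([] : List Char) else [' ']) = t.map pvSep := by
        simp [pvSep]
      by_cases hl : PySem.Chars.isIn last.toList pvPunct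
      · simp only [hl, not_true, if_true, if_false]
        rw [hmap, pvZipB t w [' ']]
      · simp only [hl, Bool.false_eq_true, not_false_eq_true, if_true, if_false]
        rw [hmap, pvZipB t w ['.', ' ']]
        simp [PySem.List.slice_to_neg_one]
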